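-- pv_equiv track=rewrite | github.com/soniapop93/Advent_of_Code_2015 | Day_1/day_1_2.py | get_floor_basement
-- ===== SOURCE A (Python) =====
-- def get_floor_basement(input_list):
--     count_floor = 0
--     index = 0
--     for i in input_list[0]:
--         if "(" in i:
--             count_floor += 1
--         else:
--             count_floor -= 1
--         if count_floor == -1:
--             return index + 1
--         index += 1
-- ===== SOURCE B (Python) =====
-- def get_floor_basement(input_list):
--     closers = [p for p, ch in enumerate(input_list[0]) if ch != "("]
--     return next((p + 1 for k, p in enumerate(closers) if p == 2 * k), None)
-- ===== Notes on version B (the rewrite author's own statement) =====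
-- stated objective: alternative
-- what changed: B keeps no running floor counter at all: it collects the positions of the non-'(' characters and returns p+1 for the first such position p that equals twice its rank k among them (floor after the k-th closer at position p is p-2k-1, so p==2k characterizes the first basement).
import Mathlib
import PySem

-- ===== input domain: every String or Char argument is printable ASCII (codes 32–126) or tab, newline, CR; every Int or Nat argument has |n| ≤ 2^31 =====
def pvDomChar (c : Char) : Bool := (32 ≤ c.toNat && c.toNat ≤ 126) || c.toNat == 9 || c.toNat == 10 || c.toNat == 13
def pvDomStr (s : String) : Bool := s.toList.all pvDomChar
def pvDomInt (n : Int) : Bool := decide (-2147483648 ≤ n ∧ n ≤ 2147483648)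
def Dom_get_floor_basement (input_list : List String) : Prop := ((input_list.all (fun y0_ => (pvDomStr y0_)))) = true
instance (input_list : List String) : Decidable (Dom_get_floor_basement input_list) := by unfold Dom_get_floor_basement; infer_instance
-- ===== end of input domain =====

-- B drops A's running floor counter: it lists the positions of non-'(' characters and returns p+1 for the first whose position p equals twice its rank (alternative algorithm, same O(n) cost); on [] both Pythons raise IndexError (excluded by Pre_).


-- ===== PORT A =====
-- A's for-loop: running count_floor and index, early return index+1 when count_floor hits -1
def goA : List Char → Int → Int → Option Int
  | [], _, _ => none
  | c :: rest, count_floor, index =>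
    let count' := if c = '(' then count_floor + 1 else count_floor - 1
    if count' = -1 then some (index + 1) else goA rest count' (index + 1)

def get_floor_basement (input_list : List String) : Option Int :=
  match input_list with
  | [] => none   -- Python raises IndexError here; excluded by Pre_
  | s :: _ => goA s.toList 0 0

-- ===== PORT B =====
-- next((p + 1 for k, p in enumerate(closers) if p == 2 * k), None)
def searchB : List Int → Int → Option Int
  | [], _ => none
  | p :: ps, k => if p = 2 * k then some (p + 1) else searchB ps (k + 1)

def get_floor_basement_alt (input_list : List String) : Option Int :=
  match input_list with
  | [] => none   -- Python raises IndexError here; excluded by Pre_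
  | s :: _ =>
    -- closers = [p for p, ch in enumerate(input_list[0]) if ch != "("]
    let closers := ((PySem.List.enumerate s.toList 0).filter (fun pc => pc.2 ≠ '(')).map Prod.fst
    searchB closers 0

-- ===== PRECONDITION & SPEC =====
-- Pre_ excludes only the empty list, on which Python A raises IndexError (input_list[0]).
def Pre_get_floor_basement (input_list : List String) : Prop := input_list ≠ []
instance (input_list : List String) : Decidable (Pre_get_floor_basement input_list) := by unfold Pre_get_floor_basement; infer_instance
def pvWitness_get_floor_basement : List String := ["(()())"]

def Spec_get_floor_basement (input_list : List String) (out : Option Int) : Prop := out = get_floor_basement_alt input_list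
instance (input_list : List String) (out : Option Int) : Decidable (Spec_get_floor_basement input_list out) := by unfold Spec_get_floor_basement; infer_instance

-- ===== CLAIM =====
def Claim_equal_get_floor_basement : Prop := ∀ (input_list : List String), Dom_get_floor_basement input_list → Pre_get_floor_basement input_list → Spec_get_floor_basement input_list (get_floor_basement input_list)

-- ===== LEMMAS AND PROOFS =====
-- Invariant: after consuming i characters among which k were closers, A's counter is i - 2k;
-- it hits -1 at a closer exactly when its position i equals 2k.
theorem goA_eq_searchB (cs : List Char) : ∀ (i k : Nat), 2 * k ≤ i →
    goA cs ((i : Int) - 2 * (k : Int)) (i : Int)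
      = searchB (((PySem.List.enumerate cs (i : Int)).filter (fun pc => pc.2 ≠ '(')).map Prod.fst) (k : Int) := by
  induction cs with
  | nil => intro i k _; simp [goA, PySem.List.enumerate, searchB]
  | cons c rest ih =>
    intro i k hk
    simp only [goA, PySem.List.enumerate_cons, List.filter_cons]
    by_cases hc : c = '('
    · -- open paren: counter becomes i+1-2k ≥ 1, never -1; enumerate entry filtered out
      have h1 : (if c = '(' then (i:Int) - 2*(k:Int) + 1 else (i:Int) - 2*(k:Int) - 1)
          = ((i+1 : Nat) : Int) - 2*(k:Int) := by simp [hc]; ring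
      rw [h1]
      have hne : ¬ (((i+1 : Nat) : Int) - 2*(k:Int) = -1) := by push_cast; omega
      rw [if_neg hne]
      have := ih (i+1) k (by omega)
      simp only [hc] at *
      simpa [Nat.cast_add] using this
    · -- closer: counter i-2k-1; hits -1 iff i = 2k, matching searchB's test p = 2k
      have h1 : (if c = '(' then (i:Int) - 2*(k:Int) + 1 else (i:Int) - 2*(k:Int) - 1)
          = (i:Int) - 2*(k:Int) - 1 := by simp [hc]
      rw [h1]
      simp only [hc, decide_eq_true_eq, if_pos, ne_eq, not_false_iff]
      simp only [List.map_cons, searchB]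
      by_cases he : (i : Int) = 2 * (k : Int)
      · have : (i:Int) - 2*(k:Int) - 1 = -1 := by omega
        rw [if_pos this, if_pos he]
      · have hne : ¬ ((i:Int) - 2*(k:Int) - 1 = -1) := by omega
        rw [if_neg hne, if_neg he]
        have hk' : 2 * (k+1) ≤ i + 1 := by omega
        have := ih (i+1) (k+1) hk'
        push_cast at this
        have h2 : (i:Int) + 1 - 2*((k:Int)+1) = (i:Int) - 2*(k:Int) - 1 := by ring
        rw [h2] at this
        simpa using this

-- ===== VERDICT =====
theorem get_floor_basement_spec : Claim_equal_get_floor_basement := by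
  intro input_list _ hpre
  unfold Spec_get_floor_basement get_floor_basement get_floor_basement_alt
  cases input_list with
  | nil => exact absurd rfl hpre
  | cons s rest => simpa using goA_eq_searchB s.toList 0 0 (by omega)
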